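-- pv_equiv track=rewrite | github.com/Yash9988/self-learn | leetcode/3160.py | queryResults_op
-- ===== SOURCE A (Python) =====
-- def queryResults_op(limit: int, queries: list[list[int]]) -> list[int]:
--
--     res = []                                                        # res[i] = distinct # of colors after queries[i]
--     distinct = 0                                                    # current distinct # of colors
--
--     ball_color = {}                                                 # ball : color of the ball
--     color_count = {}                                                # color : count of the color
--
--     for ball, new_color in queries:
--         # Considering the removal of the ball's old color, update 'color_count'
--         if ball in ball_color:
--             old_color = ball_color[ball]
--             color_count[old_color] -= 1
--             if color_count[old_color] == 0:
--                 # A unique color is deleted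
--                 del color_count[old_color]
--                 distinct -= 1
--
--         # Update the ball's color and update 'color_count' as appropriate
--         ball_color[ball] = new_color
--         if new_color in color_count:
--             color_count[new_color] += 1
--         else:
--             # A unique color is added
--             color_count[new_color] = 1
--             distinct += 1
--
--         # Append the distinct # of colors after executing updates
--         res.append(distinct)
--
--     return res
-- ===== SOURCE B (Python) =====
-- def queryResults_op(limit: int, queries: list[list[int]]) -> list[int]:
--     # Simpler: keep only ball->color; recompute the distinct-color count by a
--     # full rescan of the current colors after each query.
--     ball_color = {}
--     res = []
--     for ball, new_color in queries:
--         ball_color[ball] = new_color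
--         res.append(len(set(ball_color.values())))
--     return res
-- ===== Notes on version B (the rewrite author's own statement) =====
-- stated objective: simpler
-- what changed: Drops A's color_count dict and incremental distinct counter entirely: B keeps only the ball->color dict and recomputes the distinct count after each query by rescanning its values with len(set(...)).
import Mathlib
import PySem

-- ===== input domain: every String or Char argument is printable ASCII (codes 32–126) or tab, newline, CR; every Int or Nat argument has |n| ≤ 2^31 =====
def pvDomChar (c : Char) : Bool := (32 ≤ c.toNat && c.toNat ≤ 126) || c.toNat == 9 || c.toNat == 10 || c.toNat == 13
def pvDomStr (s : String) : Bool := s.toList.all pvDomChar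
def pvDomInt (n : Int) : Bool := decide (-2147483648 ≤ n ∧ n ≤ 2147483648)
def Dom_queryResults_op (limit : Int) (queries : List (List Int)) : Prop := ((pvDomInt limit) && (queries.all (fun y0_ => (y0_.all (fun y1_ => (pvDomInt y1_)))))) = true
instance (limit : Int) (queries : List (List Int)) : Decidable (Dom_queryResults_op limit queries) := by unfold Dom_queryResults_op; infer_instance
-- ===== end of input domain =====

-- B replaces A's incremental color_count/distinct bookkeeping by recomputing the
-- distinct-color count from scratch (len(set(ball_color.values()))) after each query;
-- simpler, not faster.

-- ===== PORT A =====
-- one iteration of A's for-loop; state = (res, distinct, ball_color, color_count)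
def qrStepA (s : List Int × Int × PySem.Dict Int Int × PySem.Dict Int Int) (q : List Int) :
    List Int × Int × PySem.Dict Int Int × PySem.Dict Int Int :=
  match q with
  | [ball, newColor] =>
    let res := s.1
    let distinct := s.2.1
    let bc := s.2.2.1
    let cc := s.2.2.2
    -- `if ball in ball_color:` — removal of the old color
    let dc : Int × PySem.Dict Int Int :=
      match bc.get? ball with
      | some oldColor =>
        -- `color_count[old_color] -= 1`; the key is always present (invariant proved below),
        -- so getD with default 0 is exact here
        let cc := cc.insert oldColor (cc.getD oldColor 0 - 1)
        if cc.getD oldColor 0 = 0 then (distinct - 1, cc.erase oldColor) else (distinct, cc)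
      | none => (distinct, cc)
    let bc := bc.insert ball newColor
    let dc2 : Int × PySem.Dict Int Int :=
      if dc.2.contains newColor then (dc.1, dc.2.insert newColor (dc.2.getD newColor 0 + 1))
      else (dc.1 + 1, dc.2.insert newColor 1)
    (res ++ [dc2.1], dc2.1, bc, dc2.2)
  | _ => s  -- unreachable under Pre_: Python's unpacking `ball, new_color = q` raises here

def queryResults_op (limit : Int) (queries : List (List Int)) : List Int :=
  (queries.foldl qrStepA ([], 0, PySem.Dict.empty, PySem.Dict.empty)).1

-- ===== PORT B =====
-- one iteration of B's for-loop; state = (res, ball_color)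
def qrStepB (s : List Int × PySem.Dict Int Int) (q : List Int) : List Int × PySem.Dict Int Int :=
  match q with
  | [ball, newColor] =>
    let bc := s.2.insert ball newColor
    (s.1 ++ [((PySem.Set.ofList bc.values).length : Int)], bc)
  | _ => s  -- unreachable under Pre_: Python's unpacking raises here

def queryResults_op_alt (limit : Int) (queries : List (List Int)) : List Int :=
  (queries.foldl qrStepB ([], PySem.Dict.empty)).1

-- ===== PRECONDITION & SPEC =====
-- Pre_ excludes exactly the inputs where both Pythons raise ValueError: a query that is
-- not a 2-element [ball, color] pair (tuple unpacking fails there).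
def Pre_queryResults_op (limit : Int) (queries : List (List Int)) : Prop :=
  ∀ q ∈ queries, q.length = 2
instance (limit : Int) (queries : List (List Int)) : Decidable (Pre_queryResults_op limit queries) := by
  unfold Pre_queryResults_op; infer_instance

def pvWitness_queryResults_op : Int × List (List Int) := (4, [[1, 4], [2, 5], [1, 3], [3, 4]])

def Spec_queryResults_op (limit : Int) (queries : List (List Int)) (out : List Int) : Prop := out = queryResults_op_alt limit queries
instance (limit : Int) (queries : List (List Int)) (out : List Int) : Decidable (Spec_queryResults_op limit queries out) := by unfold Spec_queryResults_op; infer_instance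

-- ===== CLAIM (what is proved, stated in full; the proofs are below) =====
def Claim_equal_queryResults_op : Prop := ∀ (limit : Int) (queries : List (List Int)), Dom_queryResults_op limit queries → Pre_queryResults_op limit queries → Spec_queryResults_op limit queries (queryResults_op limit queries)

-- ===== LEMMAS AND PROOFS =====

-- the invariant tying A's color_count/distinct to an abstract color-count function f
def CCInv (f : Int → Nat) (distinct : Int) (cc : PySem.Dict Int Int) : Prop :=
  cc.keys.Nodup ∧
  (∀ c, cc.contains c = true ↔ 0 < f c) ∧
  (∀ c, cc.getD c 0 = (f c : Int)) ∧
  distinct = (cc.keys.length : Int)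

-- ---- small generic facts about Dict.erase (not provided by PySem) ----

theorem erase_keys_nodup (d : PySem.Dict Int Int) (k : Int) (h : d.keys.Nodup) :
    (d.erase k).keys.Nodup := by
  unfold PySem.Dict.erase PySem.Dict.keys at *
  exact List.Nodup.sublist (List.Sublist.map _ List.filter_sublist) h

theorem erase_contains (d : PySem.Dict Int Int) (k c : Int) :
    (d.erase k).contains c = if c = k then false else d.contains c := by
  unfold PySem.Dict.erase PySem.Dict.contains
  rw [List.any_filter]
  by_cases hck : c = k
  · subst hck
    simp only [if_pos]
    simp [List.any_eq_false]
  · simp only [hck, if_neg, not_false_iff]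
    apply PySem.List.any_congr_mem
    intro a _
    by_cases hac : a.1 = c
    · have : (a.1 == k) = false := by simp [hac, hck]
      simp [hac, this, hck]
    · simp [hac]

theorem erase_getD (d : PySem.Dict Int Int) (k c : Int) :
    (d.erase k).getD c 0 = if c = k then 0 else d.getD c 0 := by
  unfold PySem.Dict.erase PySem.Dict.getD PySem.Dict.get?
  induction d.items with
  | nil => simp
  | cons p t ih =>
    by_cases hk : p.1 = k <;> by_cases hc : p.1 = c <;> simp_all

theorem erase_keys_length (d : PySem.Dict Int Int) (k : Int)
    (hnd : d.keys.Nodup) (hc : d.contains k = true) :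
    (d.keys.length : Int) = ((d.erase k).keys.length : Int) + 1 := by
  have hm : k ∈ d.keys := (PySem.Dict.contains_iff_mem_keys _ _).mp hc
  have hsplit := List.length_eq_length_filter_add (l := d.keys) (fun a => a == k)
  have hcount : (d.keys.filter (fun a => a == k)).length = 1 := by
    have h1 := List.count_eq_one_of_mem hnd hm
    simpa [List.count_eq_length_filter] using h1
  have hkeys : (d.erase k).keys = d.keys.filter (fun a => !(a == k)) := by
    unfold PySem.Dict.erase PySem.Dict.keys
    induction d.items with
    | nil => simp
    | cons p t ih => by_cases hk : p.1 = k <;> simp_all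
  rw [hkeys]
  omega

-- ---- counts of Dict.values under insert ----

theorem values_insert_fresh (d : PySem.Dict Int Int) (k v : Int) (h : d.contains k = false) :
    (d.insert k v).values = d.values ++ [v] := by
  unfold PySem.Dict.insert PySem.Dict.values
  simp [h]

theorem count_snd_map_update (l : List (Int × Int)) (k w v c : Int)
    (hnd : (l.map Prod.fst).Nodup) (hmem : (k, w) ∈ l) :
    ((l.map (fun p => if p.1 == k then (k, v) else p)).map Prod.snd).count c
      + (if w = c then 1 else 0)
    = (l.map Prod.snd).count c + (if v = c then 1 else 0) := by
  induction l with
  | nil => simp at hmem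
  | cons p t ih =>
    simp only [List.map_cons, List.nodup_cons] at hnd
    by_cases hk : p.1 = k
    · -- head is the unique entry with key k, so p = (k, w) and the tail is untouched
      have hknot : k ∉ t.map Prod.fst := hk ▸ hnd.1
      have hpw : p = (k, w) := by
        rcases List.mem_cons.mp hmem with h | h
        · exact h.symm
        · exact absurd (by simpa using List.mem_map_of_mem (f := Prod.fst) h) hknot
      have htail : t.map (fun p => if p.1 == k then (k, v) else p) = t := by
        have hcongr : ∀ q ∈ t, (fun p => if p.1 == k then (k, v) else p) q = id q := by
          intro q hq
          have hqk : q.1 ≠ k := fun hqk =>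
            hknot (by simpa [hqk] using List.mem_map_of_mem (f := Prod.fst) hq)
          simp [hqk]
        rw [List.map_congr_left hcongr, List.map_id]
      subst hpw
      simp only [List.map_cons, htail, beq_self_eq_true, if_pos, List.count_cons]
      by_cases hw : w = c <;> by_cases hv : v = c <;> simp [hw, hv]
    · have hmem' : (k, w) ∈ t := by
        rcases List.mem_cons.mp hmem with h | h
        · exact absurd (congrArg Prod.fst h).symm hk
        · exact h
      have hbk : (p.1 == k) = false := by simp [hk]
      have hih := ih hnd.2 hmem'
      simp only [List.map_cons, hbk, Bool.false_eq_true, if_neg, List.count_cons,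
        not_false_iff] at hih ⊢
      by_cases hp : p.2 = c <;> simp [hp] at hih ⊢ <;> omega

theorem count_values_insert_of_get (d : PySem.Dict Int Int) (k w v c : Int)
    (hnd : d.keys.Nodup) (hget : d.get? k = some w) :
    ((d.insert k v).values).count c + (if w = c then 1 else 0)
    = d.values.count c + (if v = c then 1 else 0) := by
  have hc : d.contains k = true := by
    rw [PySem.Dict.contains_eq_isSome_get?, hget]; rfl
  have hmem : (k, w) ∈ d.items := PySem.Dict.mem_items_of_get?_eq_some _ hget
  unfold PySem.Dict.insert PySem.Dict.values
  simp only [hc, if_pos]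
  exact count_snd_map_update d.items k w v c hnd hmem

theorem values_count_pos_of_get (d : PySem.Dict Int Int) (k w : Int) (hget : d.get? k = some w) :
    0 < d.values.count w := by
  have hmem : (k, w) ∈ d.items := PySem.Dict.mem_items_of_get?_eq_some _ hget
  have : w ∈ d.values := by
    unfold PySem.Dict.values
    exact List.mem_map_of_mem hmem
  exact List.count_pos_iff.mpr this

-- ---- CCInv is preserved by A's two phases ----

theorem ccinv_add_phase (f : Int → Nat) (distinct : Int) (cc : PySem.Dict Int Int) (nc : Int)
    (h : CCInv f distinct cc) :
    CCInv (fun c => f c + if nc = c then 1 else 0)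
      (if cc.contains nc then distinct else distinct + 1)
      (if cc.contains nc then cc.insert nc (cc.getD nc 0 + 1) else cc.insert nc 1) := by
  obtain ⟨hnd, hmem, hval, hlen⟩ := h
  by_cases hc : cc.contains nc = true
  · refine ⟨?_, ?_, ?_, ?_⟩ <;> simp only [hc, if_pos]
    · exact PySem.Dict.nodup_keys_insert _ _ _ hnd
    · intro c
      rw [PySem.Dict.contains_insert]
      by_cases hnc : nc = c
      · subst hnc; simp
      · have : (c == nc) = false := by simp [Ne.symm hnc]
        simp [this, hmem c, hnc]
    · intro c
      rw [PySem.Dict.getD_insert]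
      by_cases hnc : nc = c
      · subst hnc; simp [hval nc]
      · simp [Ne.symm hnc, hval c, hnc]
    · rwa [PySem.Dict.keys_insert_of_contains _ _ hc]
  · have hc' : cc.contains nc = false := by simpa using hc
    refine ⟨?_, ?_, ?_, ?_⟩ <;> simp only [hc', Bool.false_eq_true, if_neg, not_false_iff]
    · exact PySem.Dict.nodup_keys_insert _ _ _ hnd
    · intro c
      rw [PySem.Dict.contains_insert]
      by_cases hnc : nc = c
      · subst hnc; simp
      · have : (c == nc) = false := by simp [Ne.symm hnc]
        simp [this, hmem c, hnc]
    · intro c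
      rw [PySem.Dict.getD_insert]
      have hfnc : f nc = 0 := by
        by_contra hf
        exact absurd ((hmem nc).mpr (Nat.pos_of_ne_zero hf)) (by simp [hc'])
      by_cases hnc : nc = c
      · subst hnc; simp [hfnc]
      · simp [Ne.symm hnc, hval c, hnc]
    · rw [PySem.Dict.keys_insert_of_not_contains _ _ hc']
      simp [hlen]

theorem ccinv_removal_phase (f : Int → Nat) (distinct : Int) (cc : PySem.Dict Int Int) (w : Int)
    (h : CCInv f distinct cc) (hw : 0 < f w) :
    CCInv (fun c => f c - if w = c then 1 else 0)
      (if (cc.insert w (cc.getD w 0 - 1)).getD w 0 = 0 then distinct - 1 else distinct)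
      (if (cc.insert w (cc.getD w 0 - 1)).getD w 0 = 0
        then (cc.insert w (cc.getD w 0 - 1)).erase w
        else cc.insert w (cc.getD w 0 - 1)) := by
  obtain ⟨hnd, hmem, hval, hlen⟩ := h
  have hcw : cc.contains w = true := (hmem w).mpr hw
  have hgd : (cc.insert w (cc.getD w 0 - 1)).getD w 0 = (f w : Int) - 1 := by
    rw [PySem.Dict.getD_insert_self, hval w]
  have hnd1 : (cc.insert w (cc.getD w 0 - 1)).keys.Nodup := PySem.Dict.nodup_keys_insert _ _ _ hnd
  have hkeys1 : (cc.insert w (cc.getD w 0 - 1)).keys = cc.keys :=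
    PySem.Dict.keys_insert_of_contains _ _ hcw
  have hcont1 : ∀ c, (cc.insert w (cc.getD w 0 - 1)).contains c = cc.contains c := by
    intro c
    rw [PySem.Dict.contains_insert]
    by_cases hwc : c = w
    · subst hwc; simp [hcw]
    · simp [hwc]
  have hval1 : ∀ c, (cc.insert w (cc.getD w 0 - 1)).getD c 0
      = if w = c then (f w : Int) - 1 else (f c : Int) := by
    intro c
    rw [PySem.Dict.getD_insert]
    by_cases hwc : w = c
    · subst hwc; simp [hval]
    · simp [Ne.symm hwc, hwc, hval c]
  by_cases hz : (cc.insert w (cc.getD w 0 - 1)).getD w 0 = 0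
  · -- f w = 1; the key w is deleted
    have hfw1 : f w = 1 := by rw [hgd] at hz; omega
    refine ⟨?_, ?_, ?_, ?_⟩ <;> simp only [hz, if_pos]
    · exact erase_keys_nodup _ _ hnd1
    · intro c
      rw [erase_contains]
      by_cases hwc : c = w
      · subst hwc; simp [hfw1]
      · simp [hwc, hcont1 c, hmem c, Ne.symm hwc]
    · intro c
      rw [erase_getD]
      by_cases hwc : c = w
      · subst hwc; simp [hfw1]
      · simp [hwc, hval1 c, Ne.symm hwc]
    · have hlen2 := erase_keys_length (cc.insert w (cc.getD w 0 - 1)) w hnd1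
        (by rw [hcont1]; exact hcw)
      rw [hkeys1] at hlen2
      omega
  · -- f w ≥ 2; the count is merely decremented
    have hfw2 : 2 ≤ f w := by rw [hgd] at hz; omega
    refine ⟨?_, ?_, ?_, ?_⟩ <;> simp only [hz, if_neg, not_false_iff]
    · exact hnd1
    · intro c
      rw [hcont1 c]
      by_cases hwc : w = c
      · subst hwc
        constructor
        · intro _
          have h1 : (if w = w then 1 else 0) = 1 := if_pos rfl
          omega
        · intro _; exact hcw
      · simp [hmem c, hwc]
    · intro c
      rw [hval1 c]
      by_cases hwc : w = c
      · subst hwc; simp; omega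
      · simp [hwc]
    · rw [hkeys1]; exact hlen

-- ---- the distinct count read off cc.keys equals B's rescan ----

theorem keys_length_eq_set_length (cc : PySem.Dict Int Int) (vs : List Int)
    (hnd : cc.keys.Nodup) (hiff : ∀ c, cc.contains c = true ↔ c ∈ vs) :
    cc.keys.length = (PySem.Set.ofList vs).length := by
  have hmem : ∀ c, c ∈ cc.keys ↔ c ∈ PySem.Set.ofList vs := by
    intro c
    rw [← PySem.Dict.contains_iff_mem_keys, hiff c, PySem.Set.mem_ofList]
  exact ((List.perm_ext_iff_of_nodup hnd (PySem.Set.nodup_ofList vs)).mpr hmem).length_eq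

-- ---- the full per-step correspondence ----

def StateRel (sA : List Int × Int × PySem.Dict Int Int × PySem.Dict Int Int)
    (sB : List Int × PySem.Dict Int Int) : Prop :=
  sA.1 = sB.1 ∧ sA.2.2.1 = sB.2 ∧ sA.2.2.1.keys.Nodup ∧
  CCInv (fun c => sA.2.2.1.values.count c) sA.2.1 sA.2.2.2

theorem stateRel_step (sA : List Int × Int × PySem.Dict Int Int × PySem.Dict Int Int)
    (sB : List Int × PySem.Dict Int Int) (q : List Int) (h : StateRel sA sB) :
    StateRel (qrStepA sA q) (qrStepB sB q) := by
  obtain ⟨res, distinct, bc, cc⟩ := sA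
  obtain ⟨resB, bcB⟩ := sB
  obtain ⟨hres, hbc, hbcnd, hcc⟩ := h
  simp only at hres hbc hbcnd hcc
  subst hres hbc
  match q with
  | [] => exact ⟨rfl, rfl, hbcnd, hcc⟩
  | [_] => exact ⟨rfl, rfl, hbcnd, hcc⟩
  | (_ :: _ :: _ :: _) => exact ⟨rfl, rfl, hbcnd, hcc⟩
  | [ball, nc] =>
    have hbcnd' : (bc.insert ball nc).keys.Nodup := PySem.Dict.nodup_keys_insert _ _ _ hbcnd
    -- after both phases, CCInv holds for the counts of the updated ball_color
    have key : CCInv (fun c => (bc.insert ball nc).values.count c)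
        (qrStepA (res, distinct, bc, cc) [ball, nc]).2.1
        (qrStepA (res, distinct, bc, cc) [ball, nc]).2.2.2 := by
      cases hget : bc.get? ball with
      | none =>
        have hcfalse : bc.contains ball = false := by
          rw [PySem.Dict.contains_eq_isSome_get?, hget]; rfl
        have hvals : (bc.insert ball nc).values = bc.values ++ [nc] :=
          values_insert_fresh bc ball nc hcfalse
        have hadd := ccinv_add_phase (fun c => bc.values.count c) distinct cc nc hcc
        have hcnt : (fun c => (bc.insert ball nc).values.count c)
            = fun c => bc.values.count c + if nc = c then 1 else 0 := by
          funext c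
          rw [hvals, List.count_append]
          by_cases hnc : nc = c <;> simp [hnc]
        rw [hcnt]
        simp only [qrStepA, hget]
        by_cases hc : cc.contains nc = true <;> simp only [hc] at hadd ⊢ <;>
          simpa [hc] using hadd
      | some w =>
        have hwpos : 0 < bc.values.count w := values_count_pos_of_get bc ball w hget
        have hrem := ccinv_removal_phase (fun c => bc.values.count c) distinct cc w hcc hwpos
        have hcnt : (fun c => (bc.insert ball nc).values.count c)
            = fun c => (bc.values.count c - if w = c then 1 else 0) + if nc = c then 1 else 0 := by
          funext c
          have heq := count_values_insert_of_get bc ball w nc c hbcnd hget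
          by_cases hw : w = c <;> by_cases hn : nc = c <;> simp [hw, hn] at heq ⊢
          · have : 0 < bc.values.count c := hw ▸ hwpos
            omega
          · have : 0 < bc.values.count c := hw ▸ hwpos
            omega
          · omega
          · omega
        rw [hcnt]
        by_cases hz : (cc.insert w (cc.getD w 0 - 1)).getD w 0 = 0
        · have hrem' := hrem
          simp only [hz, if_pos] at hrem'
          have hadd := ccinv_add_phase _ (distinct - 1)
            ((cc.insert w (cc.getD w 0 - 1)).erase w) nc hrem'
          simp only [qrStepA, hget, hz, if_pos]
          by_cases hc : ((cc.insert w (cc.getD w 0 - 1)).erase w).contains nc = true <;>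
            simp only [hc] at hadd ⊢ <;> simpa [hc] using hadd
        · have hrem' := hrem
          simp only [hz, if_neg, not_false_iff] at hrem'
          have hadd := ccinv_add_phase _ distinct (cc.insert w (cc.getD w 0 - 1)) nc hrem'
          simp only [qrStepA, hget, hz, if_neg, not_false_iff]
          by_cases hc : (cc.insert w (cc.getD w 0 - 1)).contains nc = true <;>
            simp only [hc] at hadd ⊢ <;> simpa [hc] using hadd
    -- B appends exactly the distinct count A appends
    have hout : (qrStepA (res, distinct, bc, cc) [ball, nc]).2.1
        = ((PySem.Set.ofList (bc.insert ball nc).values).length : Int) := by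
      obtain ⟨hnd2, hmem2, _, hlen2⟩ := key
      rw [hlen2]
      congr 1
      refine keys_length_eq_set_length _ _ hnd2 ?_
      intro c
      rw [hmem2 c]
      exact ⟨fun h => List.count_pos_iff.mp h, fun h => List.count_pos_iff.mpr h⟩
    refine ⟨?_, rfl, hbcnd', key⟩
    show (qrStepA (res, distinct, bc, cc) [ball, nc]).1 = (qrStepB (res, bc) [ball, nc]).1
    have h1 : (qrStepA (res, distinct, bc, cc) [ball, nc]).1
        = res ++ [(qrStepA (res, distinct, bc, cc) [ball, nc]).2.1] := rfl
    rw [h1, hout]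
    rfl

theorem stateRel_foldl (queries : List (List Int))
    (sA : List Int × Int × PySem.Dict Int Int × PySem.Dict Int Int)
    (sB : List Int × PySem.Dict Int Int) (h : StateRel sA sB) :
    StateRel (queries.foldl qrStepA sA) (queries.foldl qrStepB sB) := by
  induction queries generalizing sA sB with
  | nil => exact h
  | cons q t ih => exact ih _ _ (stateRel_step sA sB q h)

-- ===== VERDICT (by name: the statement is the Claim_ definition above) =====
theorem queryResults_op_spec : Claim_equal_queryResults_op := by
  intro limit queries _ _
  show queryResults_op limit queries = queryResults_op_alt limit queries
  have h0 : StateRel ([], 0, PySem.Dict.empty, PySem.Dict.empty) ([], PySem.Dict.empty) := by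
    refine ⟨rfl, rfl, by simp [PySem.Dict.keys, PySem.Dict.empty], ?_, ?_, ?_, ?_⟩ <;>
      simp [PySem.Dict.keys, PySem.Dict.empty, PySem.Dict.contains,
        PySem.Dict.getD, PySem.Dict.get?, PySem.Dict.values]
  exact (stateRel_foldl queries _ _ h0).1
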